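-- pv_equiv track=rewrite | github.com/haythamsoufi/ngodatabank | Backoffice/scripts/import_fdrs_form_data.py | _disagg_base
-- ===== SOURCE A (Python) =====
-- _FDRS_STRIP_SUFFIXES = ("_Tot", "_I", "_CPD", "_M", "_F")
--
-- def _disagg_base(kpi: str) -> str:
--     """Strip trailing _Tot, _CPD, _I, _M, _F to get base for disagg lookup (e.g. KPI_DonBlood_Tot -> KPI_DonBlood)."""
--     if not kpi:
--         return kpi
--     s = kpi.strip()
--     while True:
--         reduced = False
--         for suffix in _FDRS_STRIP_SUFFIXES:
--             if s.endswith(suffix):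
--                 s = s[: -len(suffix)].rstrip("_")
--                 reduced = True
--                 break
--         if not reduced:
--             break
--     return s
-- ===== SOURCE B (Python) =====
-- _FDRS_STRIP_SUFFIXES = ("_Tot", "_I", "_CPD", "_M", "_F")
--
-- def _disagg_base(kpi: str) -> str:
--     """Single backward scan: walk the reversed string once, consuming
--     reversed suffixes (each optionally followed by extra underscores),
--     then cut the string at the last accepted position."""
--     if not kpi:
--         return kpi
--     s = kpi.strip()
--     rev = s[::-1]
--     rsufs = tuple(suf[::-1] for suf in _FDRS_STRIP_SUFFIXES)
--     n = len(rev)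
--     i = 0
--     while True:
--         for rs in rsufs:
--             if rev.startswith(rs, i):
--                 j = i + len(rs)
--                 while j < n and rev[j] == '_':
--                     j += 1
--                 i = j
--                 break
--         else:
--             break
--     return s[:n - i]
-- ===== Notes on version B (the rewrite author's own statement) =====
-- stated objective: alternative
-- what changed: A repeatedly re-slices the string (endswith, negative slice, then stripping trailing underscores, pass after pass until a fixpoint); B reverses the string once and makes a single forward scan over it, consuming reversed suffixes each followed by any run of underscores, then cuts once at the final position.
import Mathlib
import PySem

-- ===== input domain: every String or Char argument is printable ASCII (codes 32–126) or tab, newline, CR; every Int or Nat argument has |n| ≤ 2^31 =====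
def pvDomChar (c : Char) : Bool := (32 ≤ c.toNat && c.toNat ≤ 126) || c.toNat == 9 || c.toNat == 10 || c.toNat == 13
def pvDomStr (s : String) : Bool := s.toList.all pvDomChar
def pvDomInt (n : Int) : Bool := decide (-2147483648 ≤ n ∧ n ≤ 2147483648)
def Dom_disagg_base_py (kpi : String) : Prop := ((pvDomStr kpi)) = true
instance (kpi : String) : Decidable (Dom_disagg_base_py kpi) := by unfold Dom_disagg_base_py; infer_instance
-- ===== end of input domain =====

-- B replaces A's fixpoint of endswith/slice/rstrip passes by one backward scan over the
-- reversed string (objective: alternative, single pass, no intermediate strings).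

-- ===== PORT A =====
def pvSuffixes : List (List Char) :=
  [['_','T','o','t'], ['_','I'], ['_','C','P','D'], ['_','M'], ['_','F']]

-- s.rstrip("_") ported by hand (PySem.Chars.rstrip strips whitespace, not given chars); exact.
def pvRstripU (s : List Char) : List Char :=
  (s.reverse.dropWhile (fun c => c == '_')).reverse

-- the 'for suffix in _FDRS_STRIP_SUFFIXES' body: first suffix s ends with, peeled then rstripped.
-- s[:-k] is ported as s.take (s.length - k): exact for every k ≥ 1 (Nat subtraction bottoms out
-- at 0 exactly where Python's s[:-k] gives '').
def pvPeel (sufs : List (List Char)) (s : List Char) : Option (List Char) :=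
  match sufs with
  | [] => none
  | suf :: rest =>
      if PySem.Chars.endswith s suf then
        some (pvRstripU (s.take (s.length - suf.length)))
      else pvPeel rest s

-- termination measure for A's while-loop (cited by decreasing_by below)
theorem pvPeel_length (sufs : List (List Char)) (hne : ∀ suf ∈ sufs, suf ≠ [])
    (s t : List Char) (h : pvPeel sufs s = some t) : t.length < s.length := by
  induction sufs with
  | nil => simp [pvPeel] at h
  | cons suf rest ih =>
    simp only [pvPeel] at h
    split at h
    · rename_i hend
      have hsuf : suf <:+ s := (PySem.Chars.endswith_iff s suf).mp hend
      have hlen : suf.length ≤ s.length := hsuf.length_le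
      have hpos : 0 < suf.length :=
        List.length_pos_iff.mpr (hne suf (by simp))
      have ht : pvRstripU (s.take (s.length - suf.length)) = t := Option.some.inj h
      have h1 : t.length ≤ (s.take (s.length - suf.length)).length := by
        have := List.length_dropWhile_le (fun c => c == '_')
          ((s.take (s.length - suf.length)).reverse)
        rw [← ht]
        simpa [pvRstripU] using this
      have h2 : (s.take (s.length - suf.length)).length = s.length - suf.length := by
        simp
      omega
    · exact ih (fun x hx => hne x (by simp [hx])) h

def pvALoop (s : List Char) : List Char :=
  match hp : pvPeel pvSuffixes s with
  | some t => pvALoop t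
  | none => s
termination_by s.length
decreasing_by
  exact pvPeel_length pvSuffixes (by decide) s t hp

def disagg_base_py (kpi : String) : String :=
  if kpi = "" then kpi
  else String.ofList (pvALoop (PySem.Str.strip kpi).toList)

-- ===== PORT B =====
-- rsufs = tuple(suf[::-1] for suf in _FDRS_STRIP_SUFFIXES)
def pvRSufs : List (List Char) := pvSuffixes.map List.reverse

-- the for/else over rsufs: rev.startswith(rs, i) with the tail rev[i:] represented by the
-- remaining list r; on a match, j skips underscores (the inner while) — ported as dropWhile.
def pvScanStep (rs : List (List Char)) (r : List Char) : Option (List Char) :=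
  match rs with
  | [] => none
  | p :: rest =>
      if p.isPrefixOf r then
        some ((r.drop p.length).dropWhile (fun c => c == '_'))
      else pvScanStep rest r

theorem pvScanStep_length (rs : List (List Char)) (hne : ∀ p ∈ rs, p ≠ [])
    (r t : List Char) (h : pvScanStep rs r = some t) : t.length < r.length := by
  induction rs with
  | nil => simp [pvScanStep] at h
  | cons p rest ih =>
    simp only [pvScanStep] at h
    split at h
    · rename_i hpre
      have hp : p <+: r := by
        exact List.isPrefixOf_iff_prefix.mp hpre
      have hlen : p.length ≤ r.length := hp.length_le
      have hpos : 0 < p.length := List.length_pos_iff.mpr (hne p (by simp))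
      have ht : (r.drop p.length).dropWhile (fun c => c == '_') = t := Option.some.inj h
      subst ht
      have := List.length_dropWhile_le (fun c => c == '_') (r.drop p.length)
      have h2 : (r.drop p.length).length = r.length - p.length := by simp
      omega
    · exact ih (fun x hx => hne x (by simp [hx])) h

-- the outer while True loop
def pvScan (r : List Char) : List Char :=
  match hp : pvScanStep pvRSufs r with
  | some t => pvScan t
  | none => r
termination_by r.length
decreasing_by
  exact pvScanStep_length pvRSufs (by decide) r t hp

def disagg_base_py_alt (kpi : String) : String :=
  if kpi = "" then kpi
  else
    -- rev = s[::-1]; final s[:n-i] = reverse of the unconsumed part of rev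
    String.ofList ((pvScan (PySem.Str.strip kpi).toList.reverse).reverse)

-- ===== PRECONDITION & SPEC =====
def Spec_disagg_base_py (kpi : String) (out : String) : Prop := out = disagg_base_py_alt kpi
instance (kpi : String) (out : String) : Decidable (Spec_disagg_base_py kpi out) := by unfold Spec_disagg_base_py; infer_instance

-- ===== CLAIM (what is proved, stated in full; the proofs are below) =====
def Claim_equal_disagg_base_py : Prop := ∀ (kpi : String), Dom_disagg_base_py kpi → Spec_disagg_base_py kpi (disagg_base_py kpi)

-- ===== LEMMAS AND PROOFS =====

theorem endswith_eq_rev_prefix (s suf : List Char) :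
    suf.reverse.isPrefixOf s.reverse = PySem.Chars.endswith s suf := by
  rcases h : PySem.Chars.endswith s suf with _ | _
  · have hns : ¬ suf <:+ s := fun hc => by
      have := (PySem.Chars.endswith_iff s suf).mpr hc
      simp [h] at this
    simp only [Bool.eq_false_iff, ne_eq]
    intro hc
    exact hns (List.reverse_prefix.mp (List.isPrefixOf_iff_prefix.mp hc))
  · have : suf <:+ s := (PySem.Chars.endswith_iff s suf).mp h
    exact List.isPrefixOf_iff_prefix.mpr (List.reverse_prefix.mpr this)

theorem take_sub_reverse (s : List Char) (k : Nat) :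
    (s.take (s.length - k)).reverse = s.reverse.drop k := by
  rw [List.reverse_take]
  by_cases hk : k ≤ s.length
  · congr 1
    omega
  · have h1 : s.length - (s.length - k) = s.length := by omega
    rw [h1]
    simp
    omega

theorem scanStep_eq_peel (sufs : List (List Char)) (s : List Char) :
    pvScanStep (sufs.map List.reverse) s.reverse = (pvPeel sufs s).map List.reverse := by
  induction sufs with
  | nil => simp [pvScanStep, pvPeel]
  | cons suf rest ih =>
    simp only [List.map_cons, pvScanStep, pvPeel, endswith_eq_rev_prefix]
    split
    · simp only [Option.map_some]
      congr 1
      rw [pvRstripU, List.reverse_reverse, List.length_reverse, ← take_sub_reverse]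
    · exact ih

theorem scan_eq_aux : ∀ n (s : List Char), s.length ≤ n →
    pvALoop s = (pvScan s.reverse).reverse := by
  intro n
  induction n with
  | zero =>
    intro s hs
    have hnil : s = [] := List.eq_nil_of_length_eq_zero (by omega)
    subst hnil
    rw [pvALoop, pvScan]
    rfl
  | succ n ih =>
    intro s hs
    have hstep : pvScanStep pvRSufs s.reverse = (pvPeel pvSuffixes s).map List.reverse := by
      rw [pvRSufs]; exact scanStep_eq_peel pvSuffixes s
    rw [pvALoop, pvScan]
    rcases hp : pvPeel pvSuffixes s with _ | t
    · rw [hp, Option.map_none] at hstep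
      rw [hstep]
      exact (List.reverse_reverse s).symm
    · rw [hp, Option.map_some] at hstep
      rw [hstep]
      show pvALoop t = (pvScan t.reverse).reverse
      have ht : t.length < s.length := pvPeel_length pvSuffixes (by decide) s t hp
      exact ih t (by omega)

theorem scan_eq (s : List Char) : pvALoop s = (pvScan s.reverse).reverse :=
  scan_eq_aux s.length s le_rfl

-- ===== VERDICT (by name: the statement is the Claim_ definition above) =====
theorem disagg_base_py_spec : Claim_equal_disagg_base_py := by
  intro kpi _
  unfold Spec_disagg_base_py disagg_base_py disagg_base_py_alt
  split
  · rfl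
  · rw [scan_eq]
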